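-- pv_equiv track=rewrite | github.com/tudorcoman/pa | test_lab_model/2/doiB.py | poz_max
-- ===== SOURCE A (Python) =====
-- def poz_max(lista):
--     maxim = max(lista)
--     i = 0
--     ans = []
--     for x in lista:
--         i += 1
--         if x == maxim:
--             ans.append(i)
--
--     return ans
-- ===== SOURCE B (Python) =====
-- def poz_max(lista):
--     maxim = None
--     ans = []
--     for i, x in enumerate(lista, 1):
--         if maxim is None or x > maxim:
--             maxim = x
--             ans = [i]
--         elif x == maxim:
--             ans.append(i)
--     return ans
-- ===== Notes on version B (the rewrite author's own statement) =====
-- stated objective: alternative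
-- what changed: Replaces A's two passes (max() then a position scan) by one streaming pass that keeps the running maximum and resets/extends the position list as larger/equal elements arrive.
import Mathlib
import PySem

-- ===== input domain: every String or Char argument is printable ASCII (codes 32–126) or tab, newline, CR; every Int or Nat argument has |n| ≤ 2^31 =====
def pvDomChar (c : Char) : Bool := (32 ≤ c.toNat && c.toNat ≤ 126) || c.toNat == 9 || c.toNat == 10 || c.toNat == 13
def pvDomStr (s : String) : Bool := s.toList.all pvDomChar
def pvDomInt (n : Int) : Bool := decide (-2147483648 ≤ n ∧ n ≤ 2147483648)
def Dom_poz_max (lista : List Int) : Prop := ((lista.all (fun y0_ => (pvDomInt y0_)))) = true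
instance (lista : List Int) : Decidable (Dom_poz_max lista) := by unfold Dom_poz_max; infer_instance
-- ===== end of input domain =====

-- B replaces A's two passes (max(), then a position scan) by one streaming pass keeping the
-- running maximum and its positions; same return value on every non-empty list (A raises on []).


-- ===== PORT A =====
-- A: maxim = max(lista) (ValueError on [] → none, excluded by Pre_), then one counting pass
-- appending i whenever x == maxim.
def poz_max (lista : List Int) : List Int :=
  match PySem.List.max? lista (fun y => y) with
  | none => []   -- unreachable under Pre_poz_max (Python raises ValueError here)
  | some maxim =>
    (lista.foldl (fun (s : Int × List Int) x =>
        let i := s.1 + 1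
        (i, if x == maxim then s.2 ++ [i] else s.2)) (0, [])).2

-- ===== PORT B =====
-- B: single pass; state = (running maximum as Option, positions of it, 1-based counter).
def poz_max_alt (lista : List Int) : List Int :=
  (lista.foldl (fun (s : Option Int × List Int × Int) x =>
      let i := s.2.2 + 1
      match s.1 with
      | none => (some x, [i], i)
      | some m =>
        if x > m then (some x, [i], i)
        else if x == m then (some m, s.2.1 ++ [i], i)
        else (some m, s.2.1, i)) (none, [], 0)).2.1

-- ===== PRECONDITION & SPEC =====
-- Pre_ excludes only the empty list, on which Python's max() raises ValueError.
def Pre_poz_max (lista : List Int) : Prop := lista ≠ []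
instance (lista : List Int) : Decidable (Pre_poz_max lista) := by unfold Pre_poz_max; infer_instance
def pvWitness_poz_max : List Int := ([3, 1, 3])

def Spec_poz_max (lista : List Int) (out : List Int) : Prop := out = poz_max_alt lista
instance (lista : List Int) (out : List Int) : Decidable (Spec_poz_max lista out) := by unfold Spec_poz_max; infer_instance

-- ===== CLAIM (what is proved, stated in full; the proofs are below) =====
def Claim_equal_poz_max : Prop := ∀ (lista : List Int), Dom_poz_max lista → Pre_poz_max lista → Spec_poz_max lista (poz_max lista)

-- ===== LEMMAS AND PROOFS =====

/-- 1-based positions (offset `k`) of elements equal to `m`. -/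
def posFrom (m : Int) (k : Int) : List Int → List Int
  | [] => []
  | x :: xs => (if x = m then [k + 1] else []) ++ posFrom m (k + 1) xs

theorem foldA_eq (m : Int) : ∀ (l : List Int) (k : Int) (acc : List Int),
    l.foldl (fun (s : Int × List Int) x =>
        let i := s.1 + 1
        (i, if x == m then s.2 ++ [i] else s.2)) (k, acc)
      = (k + l.length, acc ++ posFrom m k l) := by
  intro l
  induction l with
  | nil => intro k acc; simp [posFrom]
  | cons x xs ih =>
    intro k acc
    simp only [List.foldl_cons, posFrom]
    rw [ih]
    by_cases h : x = m <;> simp [h] <;> omega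

theorem foldB_eq : ∀ (l : List Int) (m k : Int) (acc : List Int),
    l.foldl (fun (s : Option Int × List Int × Int) x =>
        let i := s.2.2 + 1
        match s.1 with
        | none => (some x, [i], i)
        | some m =>
          if x > m then (some x, [i], i)
          else if x == m then (some m, s.2.1 ++ [i], i)
          else (some m, s.2.1, i)) (some m, acc, k)
      = (some (l.foldl max m),
         (if l.foldl max m > m then posFrom (l.foldl max m) k l else acc ++ posFrom m k l),
         k + l.length) := by
  intro l
  induction l with
  | nil => intro m k acc; simp [posFrom]
  | cons x xs ih =>
    intro m k acc
    simp only [List.foldl_cons, posFrom]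
    rcases lt_trichotomy m x with hx | hx | hx
    · -- x > m: reset
      have hMx : xs.foldl max (max m x) = xs.foldl max x := by rw [max_eq_right hx.le]
      rw [if_pos hx]
      rw [ih x (k + 1) [k + 1]]
      have hge : x ≤ xs.foldl max x := (PySem.List.le_foldl_max xs x).1
      simp only [hMx]
      have hgt : xs.foldl max x > m := lt_of_lt_of_le hx hge
      rw [if_pos hgt]
      rcases lt_or_eq_of_le hge with hR | hR
      · have h1 : ¬ x = xs.foldl max x := by omega
        simp [hR, h1]; omega
      · simp [← hR]; omega
    · -- x = m: append
      subst hx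
      rw [if_neg (lt_irrefl m), if_pos (beq_self_eq_true m)]
      rw [ih m (k + 1) (acc ++ [k + 1])]
      simp only [max_self]
      by_cases hR : xs.foldl max m > m
      · have h1 : ¬ m = xs.foldl max m := by omega
        simp [hR, h1]; omega
      · simp [hR]; omega
    · -- x < m: skip
      rw [if_neg (by omega : ¬ x > m), if_neg (by simp; omega : ¬ (x == m) = true)]
      rw [ih m (k + 1) acc]
      simp only [max_eq_left hx.le]
      by_cases hR : xs.foldl max m > m
      · have h1 : ¬ x = xs.foldl max m := by
          have := (PySem.List.le_foldl_max xs m).1; omega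
        simp [hR, h1]; omega
      · have h1 : ¬ x = m := by omega
        simp [hR, h1]; omega

-- ===== VERDICT (by name: the statement is the Claim_ definition above) =====
theorem poz_max_spec : Claim_equal_poz_max := by
  intro lista _ hpre
  unfold Spec_poz_max poz_max poz_max_alt
  match lista, hpre with
  | x :: xs, _ =>
    rw [PySem.List.max?_id_cons]
    simp only [List.foldl_cons]
    rw [foldA_eq, foldB_eq]
    have hge : x ≤ xs.foldl max x := (PySem.List.le_foldl_max xs x).1
    rcases lt_or_eq_of_le hge with hR | hR
    · have h1 : ¬ x = xs.foldl max x := by omega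
      simp [hR, h1]
    · simp [← hR]
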